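-- pv_equiv track=rewrite | github.com/KubakCz/AoC2020 | 19/monster_messages.py | parse
-- ===== SOURCE A (Python) =====
-- from typing import Optional, List, Iterator, Tuple, Set, Dict
--
-- def parse(rule: str) -> Tuple[Optional[str], List[List[int]]]:
--     if rule[0] == '"':
--         return rule[1], []
--     result: List[List[int]] = [[]]
--     for t in rule.split():
--         if t == '|':
--             result.append([])
--         else:
--             result[-1].append(int(t))
--     return None, result
-- ===== SOURCE B (Python) =====
-- def parse(rule):
--     if rule[0] == '"':
--         return rule[1], []
--
--     def groups(tokens):
--         if '|' in tokens:
--             i = tokens.index('|')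
--             return [[int(t) for t in tokens[:i]]] + groups(tokens[i + 1:])
--         return [[int(t) for t in tokens]]
--
--     return None, groups(rule.split())
-- ===== Notes on version B (the rewrite author's own statement) =====
-- stated objective: alternative
-- what changed: Replaces the stateful flat scan that appends to the last bucket when it meets a '|' token by a recursive splitter that cuts the token list at the first '|' (tokens.index) and maps int over each group.
import Mathlib
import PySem

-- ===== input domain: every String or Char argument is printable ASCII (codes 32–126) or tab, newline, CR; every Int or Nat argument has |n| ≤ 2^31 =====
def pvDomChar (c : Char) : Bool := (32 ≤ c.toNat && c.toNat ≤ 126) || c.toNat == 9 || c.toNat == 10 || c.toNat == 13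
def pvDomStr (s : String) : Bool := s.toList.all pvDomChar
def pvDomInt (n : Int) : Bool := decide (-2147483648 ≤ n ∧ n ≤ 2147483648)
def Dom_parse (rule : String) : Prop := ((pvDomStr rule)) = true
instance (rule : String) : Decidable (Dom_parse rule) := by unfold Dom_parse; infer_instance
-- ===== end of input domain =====

-- B replaces A's stateful append-to-last-bucket scan by a recursive split at the first '|' token (alternative decomposition, same cost).

-- ===== PORT A =====
-- int(t); the ValueError case (none) is excluded by Pre_parse, so getD 0 is never the value used
def parse (rule : String) : Option String × List (List Int) :=
  if PySem.Str.pyGet? rule 0 = some '"' then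
    ((PySem.Str.pyGet? rule 1).map (fun c => String.ofList [c]), [])
  else
    (none,
      (PySem.Str.split₀ rule).foldl
        (fun res t =>
          if t = "|" then res ++ [[]]
          else res.dropLast ++ [(res.getLast?.getD []) ++ [(PySem.Int.ofStr? t).getD 0]])
        [[]])

-- ===== PORT B =====
-- int(t), as above; raising inputs are excluded by Pre_parse
def pvToInt (t : String) : Int := (PySem.Int.ofStr? t).getD 0

-- tokens[:i] / tokens[i+1:] with 0 ≤ i < len are List.take i / List.drop (i+1), exactly as in Python
def pvGroups (tokens : List String) : List (List Int) :=
  match h : PySem.List.index? tokens "|" with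
  | some i => (tokens.take i).map pvToInt :: pvGroups (tokens.drop (i + 1))
  | none => [tokens.map pvToInt]
termination_by tokens.length
decreasing_by
  obtain ⟨pre, suf, rfl, rfl, -⟩ := (PySem.List.index?_eq_some_iff _ _ _).1 h
  have hd : (pre ++ "|" :: suf).drop (pre.length + 1) = suf := by
    rw [show pre ++ "|" :: suf = (pre ++ ["|"]) ++ suf by simp,
        show pre.length + 1 = (pre ++ ["|"]).length by simp, List.drop_left]
  rw [hd]; simp only [List.length_append, List.length_cons]; omega

def parse_alt (rule : String) : Option String × List (List Int) :=
  if PySem.Str.pyGet? rule 0 = some '"' then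
    ((PySem.Str.pyGet? rule 1).map (fun c => String.ofList [c]), [])
  else
    (none, pvGroups (PySem.Str.split₀ rule))

-- ===== PRECONDITION & SPEC =====
-- Pre_ excludes exactly the inputs where Python A raises: IndexError (empty rule, or rule[1] missing after a leading '"'
-- ) and ValueError (a token that is neither '|' nor an int literal).
def Pre_parse (rule : String) : Prop :=
  (PySem.Str.pyGet? rule 0).isSome = true ∧
  (if PySem.Str.pyGet? rule 0 = some '"' then (PySem.Str.pyGet? rule 1).isSome = true
   else ∀ t ∈ PySem.Str.split₀ rule, t = "|" ∨ (PySem.Int.ofStr? t).isSome = true)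
instance (rule : String) : Decidable (Pre_parse rule) := by unfold Pre_parse; infer_instance
def pvWitness_parse : String := "1 2 | 3"

def Spec_parse (rule : String) (out : Option String × List (List Int)) : Prop := out = parse_alt rule
instance (rule : String) (out : Option String × List (List Int)) : Decidable (Spec_parse rule out) := by unfold Spec_parse; infer_instance

-- ===== CLAIM (what is proved, stated in full; the proofs are below) =====
def Claim_equal_parse : Prop := ∀ (rule : String), Dom_parse rule → Pre_parse rule → Spec_parse rule (parse rule)

-- ===== LEMMAS AND PROOFS =====

-- prepend cur to the first group
def pvConsHead (cur : List Int) : List (List Int) → List (List Int)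
  | [] => [cur]
  | g :: gs => (cur ++ g) :: gs

lemma pvGroups_ne_nil (ts : List String) : pvGroups ts ≠ [] := by
  rw [pvGroups.eq_def]
  split <;> simp

lemma pvGroups_none (ts : List String) (h : PySem.List.index? ts "|" = none) :
    pvGroups ts = [ts.map pvToInt] := by
  rw [pvGroups.eq_def]
  split
  · rename_i i heq
    rw [h] at heq; cases heq
  · rfl

lemma pvGroups_some (ts : List String) (i : Nat) (h : PySem.List.index? ts "|" = some i) :
    pvGroups ts = (ts.take i).map pvToInt :: pvGroups (ts.drop (i + 1)) := by
  rw [pvGroups.eq_def]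
  split
  · rename_i j heq
    rw [h] at heq; cases heq; rfl
  · rename_i heq
    rw [h] at heq; cases heq

def pvStep (res : List (List Int)) (t : String) : List (List Int) :=
  if t = "|" then res ++ [[]]
  else res.dropLast ++ [(res.getLast?.getD []) ++ [(PySem.Int.ofStr? t).getD 0]]

lemma foldA_no_bar (ts : List String) (h : "|" ∉ ts) :
    ∀ (pre : List (List Int)) (cur : List Int),
      ts.foldl pvStep (pre ++ [cur]) = pre ++ [cur ++ ts.map pvToInt] := by
  induction ts with
  | nil => simp
  | cons t ts ih =>
    intro pre cur
    have ht : t ≠ "|" := fun e => h (e ▸ List.mem_cons_self)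
    have : pvStep (pre ++ [cur]) t = pre ++ [cur ++ [pvToInt t]] := by
      simp [pvStep, ht, pvToInt]
    simp only [List.foldl_cons, this, ih (fun m => h (List.mem_cons_of_mem _ m))]
    simp [pvToInt]

lemma foldA_eq_groups (n : Nat) : ∀ (ts : List String), ts.length ≤ n →
    ∀ (pre : List (List Int)) (cur : List Int),
      ts.foldl pvStep (pre ++ [cur]) = pre ++ pvConsHead cur (pvGroups ts) := by
  induction n with
  | zero =>
    intro ts hts pre cur
    have : ts = [] := List.eq_nil_of_length_eq_zero (Nat.le_zero.1 hts)
    subst this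
    rw [pvGroups_none [] ((PySem.List.index?_eq_none_iff _ _).2 (by simp))]
    simp [pvConsHead]
  | succ n ih =>
    intro ts hts pre cur
    cases h : PySem.List.index? ts "|" with
    | none =>
      have hnb : "|" ∉ ts := (PySem.List.index?_eq_none_iff _ _).1 h
      rw [pvGroups_none _ h, foldA_no_bar ts hnb]
      simp [pvConsHead]
    | some i =>
      obtain ⟨a, suf, rfl, rfl, hna⟩ := (PySem.List.index?_eq_some_iff _ _ _).1 h
      have htake : (a ++ "|" :: suf).take a.length = a := by
        simp
      have hdrop : (a ++ "|" :: suf).drop (a.length + 1) = suf := by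
        rw [show a ++ "|" :: suf = (a ++ ["|"]) ++ suf by simp,
            show a.length + 1 = (a ++ ["|"]).length by simp, List.drop_left]
      rw [pvGroups_some _ _ h, htake, hdrop]
      have hsuf : suf.length ≤ n := by
        have := hts; simp [List.length_append] at this; omega
      calc (a ++ "|" :: suf).foldl pvStep (pre ++ [cur])
          = ("|" :: suf).foldl pvStep (a.foldl pvStep (pre ++ [cur])) := by
            rw [List.foldl_append]
        _ = ("|" :: suf).foldl pvStep (pre ++ [cur ++ a.map pvToInt]) := by
            rw [foldA_no_bar a hna]
        _ = suf.foldl pvStep ((pre ++ [cur ++ a.map pvToInt]) ++ [[]]) := by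
            simp [pvStep]
        _ = (pre ++ [cur ++ a.map pvToInt]) ++ pvConsHead [] (pvGroups suf) := ih suf hsuf _ _
        _ = pre ++ pvConsHead cur ((a.map pvToInt) :: pvGroups suf) := by
            cases hg : pvGroups suf with
            | nil => exact absurd hg (pvGroups_ne_nil suf)
            | cons g gs => simp [pvConsHead]

lemma foldA_eq_pvGroups (ts : List String) :
    ts.foldl pvStep [[]] = pvGroups ts := by
  have := foldA_eq_groups ts.length ts le_rfl [] []
  simp only [List.nil_append] at this
  rw [this]
  cases hg : pvGroups ts with
  | nil => exact absurd hg (pvGroups_ne_nil ts)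
  | cons g gs => simp [pvConsHead]

-- ===== VERDICT (by name: the statement is the Claim_ definition above) =====
theorem parse_spec : Claim_equal_parse := by
  intro rule _ _
  unfold Spec_parse parse parse_alt
  split
  · rfl
  · rw [show (fun (res : List (List Int)) (t : String) =>
        if t = "|" then res ++ [[]]
        else res.dropLast ++ [(res.getLast?.getD []) ++ [(PySem.Int.ofStr? t).getD 0]]) = pvStep
        from rfl]
    rw [foldA_eq_pvGroups]
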